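-- pv_equiv track=rewrite | github.com/AnnaLindeberg/AOC23 | day14.py | columnLoad
-- ===== SOURCE A (Python) =====
-- def groupLoad(stoneCount, maxLoad):
--     # just an arithmetic sum maxLoad + (maxLoad - 1) + (maxLoad - 2) + ... + (maxLoad - stoneCount + 1)
--     return stoneCount*(2*maxLoad - stoneCount + 1)//2
--
-- def columnLoad(columnStoneSeq, columnLen):
--     res = 0
--     loadAbove = columnLen + 1
--     for stoneType, x in columnStoneSeq:
--         if stoneType == '#':
--             loadAbove = x
--         else:
--             res += groupLoad(x, loadAbove - 1)
--     return res
-- ===== SOURCE B (Python) =====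
-- def columnLoad(columnStoneSeq, columnLen):
--     # Gauss pairing: the x loads ending at m, summed by pairing first+last
--     def pairSum(x, m):
--         half = x // 2
--         total = half * (2 * m - x + 1)
--         if x % 2:
--             total += m - half
--         return total
--     # stage 1: cut the column into segments, one per stretch below a cube rock;
--     # each segment records its ceiling load m and the rounded-rock group counts in it
--     segments = [(columnLen, [])]
--     for stoneType, x in columnStoneSeq:
--         if stoneType == '#':
--             segments.append((x - 1, []))
--         else:
--             segments[-1][1].append(x)
--     # stage 2: sum the Gauss-paired group loads segment by segment
--     return sum(sum(pairSum(x, m) for x in xs) for m, xs in segments)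
-- ===== Notes on version B (the rewrite author's own statement) =====
-- stated objective: alternative
-- what changed: B first cuts the column into an explicit list of segments (ceiling load plus the rock-group counts under it) split at the cube rocks, then sums each group's load by Gauss pairing (count//2 pairs each worth first+last, plus a middle term for an odd count), replacing A's single fold with the //2 arithmetic-series closed form.
import Mathlib
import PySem

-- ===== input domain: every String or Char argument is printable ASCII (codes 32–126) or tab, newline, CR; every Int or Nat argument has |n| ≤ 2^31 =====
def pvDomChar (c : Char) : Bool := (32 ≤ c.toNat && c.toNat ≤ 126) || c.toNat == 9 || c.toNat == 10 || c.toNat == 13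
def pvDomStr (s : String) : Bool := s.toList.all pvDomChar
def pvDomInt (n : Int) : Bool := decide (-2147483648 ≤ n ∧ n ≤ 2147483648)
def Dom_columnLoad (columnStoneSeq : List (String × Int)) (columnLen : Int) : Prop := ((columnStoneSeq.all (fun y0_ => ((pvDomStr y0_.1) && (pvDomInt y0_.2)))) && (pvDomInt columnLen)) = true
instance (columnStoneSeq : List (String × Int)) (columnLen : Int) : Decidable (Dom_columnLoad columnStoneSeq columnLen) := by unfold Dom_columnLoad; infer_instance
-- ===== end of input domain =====

-- B cuts the column into explicit segments split at the cube rocks, then sums each group's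
-- load by Gauss pairing (half * (first+last) plus an odd middle term) instead of A's single
-- fold with the //2 arithmetic-series closed form (objective: alternative; same cost).


-- ===== PORT A =====
def groupLoad (stoneCount : Int) (maxLoad : Int) : Int :=
  PySem.Int.floordiv (stoneCount * (2 * maxLoad - stoneCount + 1)) 2

def columnLoad (columnStoneSeq : List (String × Int)) (columnLen : Int) : Int :=
  (columnStoneSeq.foldl
    (fun (st : Int × Int) (p : String × Int) =>
      if p.1 == "#" then (st.1, p.2)
      else (st.1 + groupLoad p.2 (st.2 - 1), st.2))
    (0, columnLen + 1)).1

-- ===== PORT B =====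
-- Gauss pairing: the x loads ending at m, summed by pairing first+last
def pairSumB (x : Int) (m : Int) : Int :=
  let half := PySem.Int.floordiv x 2
  let total := half * (2 * m - x + 1)
  if PySem.Int.mod x 2 ≠ 0 then total + (m - half) else total

-- segments[-1][1].append(x): append x to the count list of the LAST segment
def appendLastB (segs : List (Int × List Int)) (x : Int) : List (Int × List Int) :=
  match segs with
  | [] => []
  | [(m, xs)] => [(m, xs ++ [x])]
  | s :: rest => s :: appendLastB rest x

-- stage 2's sum: total load of a segment list, Gauss-paired group by group
def segTotalB (segs : List (Int × List Int)) : Int :=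
  (segs.map (fun q => (q.2.map (fun x => pairSumB x q.1)).sum)).sum

def columnLoad_alt (columnStoneSeq : List (String × Int)) (columnLen : Int) : Int :=
  let segments :=
    columnStoneSeq.foldl
      (fun (segs : List (Int × List Int)) (p : String × Int) =>
        if p.1 == "#" then segs ++ [(p.2 - 1, [])] else appendLastB segs p.2)
      [(columnLen, [])]
  segTotalB segments

-- ===== PRECONDITION & SPEC =====
def Spec_columnLoad (columnStoneSeq : List (String × Int)) (columnLen : Int) (out : Int) : Prop := out = columnLoad_alt columnStoneSeq columnLen
instance (columnStoneSeq : List (String × Int)) (columnLen : Int) (out : Int) : Decidable (Spec_columnLoad columnStoneSeq columnLen out) := by unfold Spec_columnLoad; infer_instance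

-- ===== CLAIM (what is proved, stated in full; the proofs are below) =====
def Claim_equal_columnLoad : Prop := ∀ (columnStoneSeq : List (String × Int)) (columnLen : Int), Dom_columnLoad columnStoneSeq columnLen → Spec_columnLoad columnStoneSeq columnLen (columnLoad columnStoneSeq columnLen)

-- ===== LEMMAS AND PROOFS =====

-- Gauss pairing equals the arithmetic-series closed form, for every integer x, m
theorem pairSumB_eq_groupLoad (x m : Int) : pairSumB x m = groupLoad x m := by
  unfold pairSumB groupLoad
  rw [PySem.Int.floordiv_eq_ediv_of_pos (by norm_num),
      PySem.Int.floordiv_eq_ediv_of_pos (by norm_num),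
      PySem.Int.mod_eq_emod_of_pos (by norm_num)]
  rcases Int.even_or_odd x with ⟨k, hk⟩ | ⟨k, hk⟩
  · subst hk
    have hx2 : k + k = 2 * k := by ring
    rw [hx2, Int.mul_ediv_cancel_left _ (by norm_num),
        show 2 * k * (2 * m - 2 * k + 1) = 2 * (k * (2 * m - 2 * k + 1)) by ring,
        Int.mul_ediv_cancel_left _ (by norm_num)]
    simp [Int.mul_emod_right]
  · subst hk
    rw [show 2 * k + 1 = 2 * k + 1 by rfl]
    have h1 : (2 * k + 1) / 2 = k := by omega
    have h2 : (2 * k + 1) % 2 = 1 := by omega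
    rw [h1, h2,
        show (2 * k + 1) * (2 * m - (2 * k + 1) + 1) = 2 * ((2 * k + 1) * (m - k)) by ring,
        Int.mul_ediv_cancel_left _ (by norm_num)]
    simp; ring

-- appending to the last segment of a list that visibly ends in a segment
theorem appendLastB_concat (l : List (Int × List Int)) (m : Int) (xs : List Int) (x : Int) :
    appendLastB (l ++ [(m, xs)]) x = l ++ [(m, xs ++ [x])] := by
  induction l with
  | nil => rfl
  | cons s t ih =>
      cases t with
      | nil => simp [appendLastB]
      | cons s' t' => simpa [appendLastB] using ih

-- A's fold only ever adds to its accumulator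
theorem foldA_shift (l : List (String × Int)) (r la : Int) :
    (l.foldl
      (fun (st : Int × Int) (p : String × Int) =>
        if p.1 == "#" then (st.1, p.2)
        else (st.1 + groupLoad p.2 (st.2 - 1), st.2)) (r, la)).1
    = r + (l.foldl
      (fun (st : Int × Int) (p : String × Int) =>
        if p.1 == "#" then (st.1, p.2)
        else (st.1 + groupLoad p.2 (st.2 - 1), st.2)) (0, la)).1 := by
  induction l generalizing r la with
  | nil => simp
  | cons p t ih =>
      simp only [List.foldl]
      by_cases hp : p.1 == "#"
      · simp only [hp, if_pos]
        exact ih r p.2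
      · simp only [hp, if_neg, Bool.false_eq_true, not_false_iff]
        rw [ih (r + groupLoad p.2 (la - 1)) la, ih (0 + groupLoad p.2 (la - 1)) la]
        ring

-- main invariant: B's segment fold accumulates exactly A's running load
theorem main_inv (l : List (String × Int)) (acc : List (Int × List Int))
    (xs : List Int) (la : Int) :
    segTotalB (l.foldl
      (fun (segs : List (Int × List Int)) (p : String × Int) =>
        if p.1 == "#" then segs ++ [(p.2 - 1, [])] else appendLastB segs p.2)
      (acc ++ [(la - 1, xs)]))
    = segTotalB (acc ++ [(la - 1, xs)])
      + (l.foldl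
          (fun (st : Int × Int) (p : String × Int) =>
            if p.1 == "#" then (st.1, p.2)
            else (st.1 + groupLoad p.2 (st.2 - 1), st.2)) (0, la)).1 := by
  induction l generalizing acc xs la with
  | nil => simp
  | cons p t ih =>
      simp only [List.foldl]
      by_cases hp : p.1 == "#"
      · simp only [hp, if_pos]
        rw [List.append_assoc]
        have := ih (acc ++ [(la - 1, xs)]) [] p.2
        simp only [List.append_assoc] at this
        rw [show (p.2 : Int) - 1 = p.2 - 1 by rfl] at this
        rw [this]
        simp [segTotalB]
      · simp only [hp, if_neg, Bool.false_eq_true, not_false_iff]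
        rw [appendLastB_concat, ih acc (xs ++ [p.2]) la,
            foldA_shift t (0 + groupLoad p.2 (la - 1)) la]
        simp [segTotalB, pairSumB_eq_groupLoad]
        ring

-- ===== VERDICT (by name: the statement is the Claim_ definition above) =====
theorem columnLoad_spec : Claim_equal_columnLoad := by
  intro seq len _
  unfold Spec_columnLoad columnLoad columnLoad_alt
  have := main_inv seq [] [] (len + 1)
  simp only [List.nil_append, add_sub_cancel_right] at this
  rw [this]
  simp [segTotalB]
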